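-- pv_equiv track=rewrite | github.com/more-joao/dodecaphonic-sequences | primeform_reduction.py | get_possible_arrangements
-- ===== SOURCE A (Python) =====
-- def get_possible_arrangements(set):
--     arrangements = []
--     for x in set:
--         arrangement = [e for e in set if e != x]
--         arrangement.sort()
--         arrangement.insert(0, x)
--         for i in arrangement[1::]:
--             if i < arrangement[0]:
--                 arrangement.remove(i)
--                 arrangement.insert(len(arrangement), i)
--         arrangements.append(arrangement)
--     return arrangements
-- ===== SOURCE B (Python) =====
-- def get_possible_arrangements(set):
--     s = sorted(set)
--     arrangements = []
--     for x in set: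
--         greater = [e for e in s if e > x]
--         smaller = [e for e in s if e < x]
--         arrangements.append([x] + greater + smaller)
--     return arrangements
-- ===== Notes on version B (the rewrite author's own statement) =====
-- stated objective: faster
-- what changed: B sorts the input once and builds each arrangement directly as [x] + (sorted elements > x) + (sorted elements < x) with two linear filters, replacing A's per-element re-sort plus quadratic remove/insert rotation loop.
import Mathlib
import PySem

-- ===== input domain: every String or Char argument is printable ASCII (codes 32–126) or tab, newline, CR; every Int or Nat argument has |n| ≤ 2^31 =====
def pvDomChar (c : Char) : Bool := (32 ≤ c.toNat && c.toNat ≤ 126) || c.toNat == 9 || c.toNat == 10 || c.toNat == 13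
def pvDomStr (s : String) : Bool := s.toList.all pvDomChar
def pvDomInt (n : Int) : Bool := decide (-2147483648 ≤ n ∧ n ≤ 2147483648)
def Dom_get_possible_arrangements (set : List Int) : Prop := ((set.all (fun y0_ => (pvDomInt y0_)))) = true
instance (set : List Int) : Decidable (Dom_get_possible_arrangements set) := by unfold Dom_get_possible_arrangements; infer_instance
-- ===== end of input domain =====

-- B sorts the input ONCE and emits each row with two linear filters ([x] ++ greater ++ smaller),
-- instead of A's per-element re-sort and quadratic remove/insert loop: asymptotically faster (O(n^2) vs O(n^2 log n) + quadratic list surgery).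


-- ===== PORT A =====
-- inner loop body: "if i < arrangement[0]: arrangement.remove(i); arrangement.insert(len(arrangement), i)"
-- (the 'none' fallbacks are unreachable in A's run: the list is nonempty and i is a member; Python never raises here)
def pvStepA (arr : List Int) (i : Int) : List Int :=
  match PySem.List.pyGet? arr 0 with
  | some h =>
      if i < h then
        match PySem.List.remove? arr i with
        | some arr' => PySem.List.insert arr' (PySem.List.len arr') i
        | none => arr
      else arr
  | none => arr

def get_possible_arrangements (set : List Int) : List (List Int) :=
  set.foldl (fun arrangements x =>
    let arrangement := set.filter (fun e => decide (e ≠ x))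
    let arrangement := PySem.List.sorted arrangement (fun e => e)
    let arrangement := PySem.List.insert arrangement 0 x
    let arrangement := (PySem.List.slice arrangement (some 1) none).foldl pvStepA arrangement
    arrangements ++ [arrangement]) []

-- ===== PORT B =====
def get_possible_arrangements_alt (set : List Int) : List (List Int) :=
  let s := PySem.List.sorted set (fun e => e)
  set.map (fun x =>
    x :: (s.filter (fun e => decide (x < e)) ++ s.filter (fun e => decide (e < x))))

-- ===== PRECONDITION & SPEC =====
def Spec_get_possible_arrangements (set : List Int) (out : List (List Int)) : Prop := out = get_possible_arrangements_alt set
instance (set : List Int) (out : List (List Int)) : Decidable (Spec_get_possible_arrangements set out) := by unfold Spec_get_possible_arrangements; infer_instance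

-- ===== CLAIM (what is proved, stated in full; the proofs are below) =====
def Claim_equal_get_possible_arrangements : Prop := ∀ (set : List Int), Dom_get_possible_arrangements set → Spec_get_possible_arrangements set (get_possible_arrangements set)

-- ===== LEMMAS AND PROOFS =====

-- elements not below the head are no-ops for A's inner loop
lemma pvFold_noop (x : Int) (gt st : List Int) (hgt : ∀ b ∈ gt, ¬ b < x) :
    gt.foldl pvStepA (x :: st) = x :: st := by
  induction gt with
  | nil => rfl
  | cons b gt ih =>
      simp only [List.foldl_cons]
      have hb : ¬ b < x := hgt b (by simp)
      have : pvStepA (x :: st) b = x :: st := by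
        simp [pvStepA, hb]
      rw [this]
      exact ih (fun b hb => hgt b (by simp [hb]))

-- A's inner loop moves the below-head elements, in order, to the back
lemma pvFold_main (x : Int) (lt : List Int) :
    ∀ gt done, (∀ a ∈ lt, a < x) → (∀ b ∈ gt, ¬ b < x) →
    (lt ++ gt).foldl pvStepA (x :: (lt ++ gt ++ done)) = x :: (gt ++ done ++ lt) := by
  induction lt with
  | nil =>
      intro gt done _ hgt
      simpa using pvFold_noop x gt (gt ++ done) hgt
  | cons i lt ih =>
      intro gt done hlt hgt
      have hi : i < x := hlt i (by simp)
      have hne : x ≠ i := by omega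
      have hrem : PySem.List.remove? (x :: (i :: lt ++ gt ++ done)) i
          = some (x :: (lt ++ gt ++ done)) := by
        rw [PySem.List.remove?_cons_of_ne _ hne]
        simp
      have hstep : pvStepA (x :: (i :: lt ++ gt ++ done)) i
          = x :: (lt ++ gt ++ (done ++ [i])) := by
        simp only [pvStepA, PySem.List.pyGet?_zero_cons, if_pos hi, hrem]
        have hlen : (PySem.List.len (x :: (lt ++ gt ++ done)))
            = ((x :: (lt ++ gt ++ done)).length : Int) := by
          simp [PySem.List.len]
        rw [hlen, PySem.List.insert_natCast _ _ _ (le_refl _)]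
        simp only [List.length_cons, List.take_succ_cons, List.take_length, List.drop_succ_cons,
          List.drop_length, List.cons_append, List.append_assoc]
      simp only [List.cons_append, List.foldl_cons]
      rw [show (x :: (i :: (lt ++ gt ++ done))) = x :: (i :: lt ++ gt ++ done) by simp, hstep]
      rw [ih gt (done ++ [i]) (fun a ha => hlt a (by simp [ha])) hgt]
      simp

-- a (≤)-sorted list splits as its below-x part followed by its rest
lemma pvSplit (x : Int) (r : List Int) (h : r.Pairwise (· ≤ ·)) :
    r = r.filter (fun e => decide (e < x)) ++ r.filter (fun e => !decide (e < x)) := by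
  induction r with
  | nil => rfl
  | cons a r ih =>
      have ha : ∀ b ∈ r, a ≤ b := fun b hb => List.rel_of_pairwise_cons h hb
      have h' := List.Pairwise.of_cons h
      by_cases hax : a < x
      · simpa [List.filter_cons, hax] using ih h'
      · have h1 : r.filter (fun e => decide (e < x)) = [] := by
          rw [List.filter_eq_nil_iff]
          intro b hb
          have := ha b hb
          simp; omega
        have h2 : r.filter (fun e => !decide (e < x)) = r := by
          rw [List.filter_eq_self]
          intro b hb
          have := ha b hb
          simp; omega
        simp [hax, h1, h2]

-- sorting commutes with filtering (identity key on Int)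
lemma pvSortedFilter (p : Int → Bool) (xs : List Int) :
    PySem.List.sorted (xs.filter p) (fun e => e)
      = (PySem.List.sorted xs (fun e => e)).filter p := by
  apply PySem.List.sorted_id_eq_of_perm_of_pairwise
  · exact List.Perm.filter p (PySem.List.sorted_perm xs (fun e => e) false)
  · exact List.Pairwise.filter p (PySem.List.sorted_pairwise xs (fun e => e))

-- A's per-element row equals B's per-element row
lemma pvRow (set : List Int) (x : Int) :
    (PySem.List.slice
        (PySem.List.insert (PySem.List.sorted (set.filter (fun e => decide (e ≠ x))) (fun e => e)) 0 x)
        (some 1) none).foldl pvStepA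
      (PySem.List.insert (PySem.List.sorted (set.filter (fun e => decide (e ≠ x))) (fun e => e)) 0 x)
    = x :: ((PySem.List.sorted set (fun e => e)).filter (fun e => decide (x < e))
          ++ (PySem.List.sorted set (fun e => e)).filter (fun e => decide (e < x))) := by
  set s := PySem.List.sorted set (fun e => e) with hs
  set r := PySem.List.sorted (set.filter (fun e => decide (e ≠ x))) (fun e => e) with hr
  have hrs : r = s.filter (fun e => decide (e ≠ x)) := pvSortedFilter _ set
  have hpair : r.Pairwise (· ≤ ·) := hr ▸ PySem.List.sorted_pairwise _ _
  set lt := r.filter (fun e => decide (e < x)) with hlt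
  set gt := r.filter (fun e => !decide (e < x)) with hgt
  have hsplit : r = lt ++ gt := pvSplit x r hpair
  have hlt' : ∀ a ∈ lt, a < x := by
    intro a ha; rw [hlt, List.mem_filter] at ha; simpa using ha.2
  have hgt' : ∀ b ∈ gt, ¬ b < x := by
    intro b hb; rw [hgt, List.mem_filter] at hb; simpa using hb.2
  rw [PySem.List.insert_zero, PySem.List.slice_from_one, List.tail_cons]
  have hfold : (lt ++ gt).foldl pvStepA (x :: (lt ++ gt ++ [])) = x :: (gt ++ [] ++ lt) :=
    pvFold_main x lt gt [] hlt' hgt'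
  simp only [List.append_nil] at hfold
  conv_lhs => rw [hsplit]
  rw [hfold]
  -- identify the two filter halves with B's
  have e1 : gt = s.filter (fun e => decide (x < e)) := by
    rw [hgt, hrs, List.filter_filter]
    apply List.filter_congr
    intro e _
    by_cases h1 : e < x <;> by_cases h2 : e = x <;> simp [h1, h2] <;> omega
  have e2 : lt = s.filter (fun e => decide (e < x)) := by
    rw [hlt, hrs, List.filter_filter]
    apply List.filter_congr
    intro e _
    by_cases h1 : e < x <;> by_cases h2 : e = x <;> simp [h1, h2]
  rw [e1, e2]

-- ===== VERDICT (by name: the statement is the Claim_ definition above) =====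
theorem get_possible_arrangements_spec : Claim_equal_get_possible_arrangements := by
  intro set _
  unfold Spec_get_possible_arrangements get_possible_arrangements get_possible_arrangements_alt
  simp only []
  rw [show (fun (arrangements : List (List Int)) (x : Int) =>
        arrangements ++ [(PySem.List.slice
          (PySem.List.insert (PySem.List.sorted (set.filter (fun e => decide (e ≠ x))) (fun e => e)) 0 x)
          (some 1) none).foldl pvStepA
          (PySem.List.insert (PySem.List.sorted (set.filter (fun e => decide (e ≠ x))) (fun e => e)) 0 x)])
      = (fun (arrangements : List (List Int)) (x : Int) =>
        arrangements ++ [x :: ((PySem.List.sorted set (fun e => e)).filter (fun e => decide (x < e))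
          ++ (PySem.List.sorted set (fun e => e)).filter (fun e => decide (e < x)))])
      from by funext acc x; rw [pvRow set x]]
  exact PySem.List.foldl_append_singleton_eq_map _ set []
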